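-- pv_equiv track=rewrite | github.com/JudgeZ/parser-lineage-analyzer | parser_lineage_analyzer/_analysis_paths.py | _has_nested_token_reference
-- ===== SOURCE A (Python) =====
-- def _has_nested_token_reference(expr: str) -> bool:
--     if "%{" not in expr:
--         return False
--     depth = 0
--     i = 0
--     while i < len(expr):
--         if expr.startswith("%{", i):
--             if depth > 0:
--                 return True
--             depth += 1
--             i += 2
--             continue
--         if expr[i] == "}" and depth:
--             depth -= 1
--         i += 1
--     return False
-- ===== SOURCE B (Python) =====
-- def _has_nested_token_reference(expr: str) -> bool:
--     # A nested reference exists iff two "%{" occur with no "}" between them,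
--     # i.e. some "}"-separated segment contains "%{" at least twice.
--     return any(seg.count('%{') >= 2 for seg in expr.split('}'))
-- ===== Notes on version B (the rewrite author's own statement) =====
-- stated objective: simpler
-- what changed: Replaced the hand-written index/depth state-machine scan with a one-line split on '}' plus a per-segment substring count (a segment with two '%{' is exactly a nested reference).
import Mathlib
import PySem

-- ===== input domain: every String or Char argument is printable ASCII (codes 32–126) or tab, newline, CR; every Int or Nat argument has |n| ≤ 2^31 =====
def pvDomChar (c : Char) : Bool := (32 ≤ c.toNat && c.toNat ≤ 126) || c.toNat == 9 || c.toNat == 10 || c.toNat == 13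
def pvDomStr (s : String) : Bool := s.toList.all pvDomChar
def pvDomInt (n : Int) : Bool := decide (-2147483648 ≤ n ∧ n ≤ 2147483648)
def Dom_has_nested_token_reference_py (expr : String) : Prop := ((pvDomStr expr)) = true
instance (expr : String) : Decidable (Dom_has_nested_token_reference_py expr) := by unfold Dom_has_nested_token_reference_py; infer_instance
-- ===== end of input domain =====

-- B replaces A's index/depth state-machine scan by split('}') plus a per-segment count of '%{' (simpler, same cost).

-- ===== PORT A =====
-- the while loop of A, ported as structural recursion over the remaining suffix with the same `depth` state
def pvLoopA : List Char → Nat → Bool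
  | [], _ => false
  | '%' :: '{' :: rest, depth =>
      if depth > 0 then true else pvLoopA rest 1
  | c :: rest, depth =>
      if c = '}' ∧ depth ≠ 0 then pvLoopA rest (depth - 1) else pvLoopA rest depth


def has_nested_token_reference_py (expr : String) : Bool :=
  if !(PySem.Str.isIn "%{" expr) then false
  else pvLoopA expr.toList 0


-- ===== PORT B =====
def has_nested_token_reference_py_alt (expr : String) : Bool :=
  (PySem.Chars.splitOn expr.toList "}".toList).any
    (fun seg => decide (2 ≤ PySem.Chars.count seg "%{".toList))

-- ===== PRECONDITION & SPEC =====
def Spec_has_nested_token_reference_py (expr : String) (out : Bool) : Prop := out = has_nested_token_reference_py_alt expr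
instance (expr : String) (out : Bool) : Decidable (Spec_has_nested_token_reference_py expr out) := by unfold Spec_has_nested_token_reference_py; infer_instance

-- ===== CLAIM (what is proved, stated in full; the proofs are below) =====
def Claim_equal_has_nested_token_reference_py : Prop := ∀ (expr : String), Dom_has_nested_token_reference_py expr → Spec_has_nested_token_reference_py expr (has_nested_token_reference_py expr)

-- ===== LEMMAS AND PROOFS =====
-- pvCnt / pvSp: recursive characterisations of count "%{" and split("}") used only in the proofs
def pvCnt : List Char → Nat
  | [] => 0
  | [_] => 0
  | a :: b :: r => if a = '%' ∧ b = '{' then pvCnt r + 1 else pvCnt (b :: r)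

def pvSp : List Char → List (List Char)
  | [] => [[]]
  | c :: r => if c = '}' then [] :: pvSp r
      else match pvSp r with
        | s :: ss => (c :: s) :: ss
        | [] => [[c]]

theorem pvSp_ne_nil (l : List Char) : pvSp l ≠ [] := by
  fun_induction pvSp l <;> simp_all

theorem count_go_eq (fuel : Nat) (l : List Char) (acc : Nat) (h : l.length ≤ fuel) :
    PySem.Chars.count.go "%{".toList fuel l acc = acc + pvCnt l := by
  induction fuel generalizing l acc with
  | zero =>
    match l, h with
    | [], _ => simp [PySem.Chars.count.go, pvCnt]
  | succ f ih =>
    match l with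
    | [] => simp [PySem.Chars.count.go, pvCnt]
    | [c] =>
      rw [PySem.Chars.count.go]
      have hp : List.isPrefixOf "%{".toList [c] = false := by
        simp [List.isPrefixOf]
      simp only [hp, Bool.false_eq_true, if_false]
      rw [ih _ _ (by simp)]
      simp [pvCnt]
    | a :: b :: r =>
      rw [PySem.Chars.count.go]
      by_cases hab : a = '%' ∧ b = '{'
      · obtain ⟨ha, hb⟩ := hab
        subst ha hb
        have hp : List.isPrefixOf "%{".toList ('%' :: '{' :: r) = true := by
          simp [List.isPrefixOf]
        simp only [hp, if_true]
        have : List.drop "%{".toList.length ('%' :: '{' :: r) = r := by simp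
        rw [this, ih _ _ (by simp at h ⊢; omega)]
        simp [pvCnt]; omega
      · have hp : List.isPrefixOf "%{".toList (a :: b :: r) = false := by
          rw [Bool.eq_false_iff]
          intro hc
          obtain ⟨t, ht⟩ := List.isPrefixOf_iff_prefix.mp hc
          simp at ht
          exact hab ⟨ht.1.symm, ht.2.1.symm⟩
        simp only [hp, Bool.false_eq_true, if_false]
        rw [ih _ _ (by simp at h ⊢; omega)]
        simp [pvCnt, hab]

theorem split_go_eq (fuel : Nat) (l cur : List Char) (acc : List (List Char)) (h : l.length ≤ fuel) :
    PySem.Chars.splitOn.go "}".toList fuel l cur acc =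
      acc.reverse ++ (match pvSp l with
        | s :: ss => (cur.reverse ++ s) :: ss
        | [] => [cur.reverse]) := by
  induction fuel generalizing l cur acc with
  | zero =>
    match l, h with
    | [], _ => simp [PySem.Chars.splitOn.go, pvSp]
  | succ f ih =>
    match l with
    | [] => simp [PySem.Chars.splitOn.go, pvSp]
    | c :: t =>
      rw [PySem.Chars.splitOn.go]
      by_cases hc : c = '}'
      · subst hc
        have hp : List.isPrefixOf "}".toList ('}' :: t) = true := by simp [List.isPrefixOf]
        simp only [hp, if_true]
        have hd : List.drop "}".toList.length ('}' :: t) = t := by simp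
        rw [hd, ih _ _ _ (by simp at h ⊢; omega)]
        rcases hsp : pvSp t with _ | ⟨s, ss⟩
        · exact absurd hsp (pvSp_ne_nil t)
        · simp [pvSp, hsp]
      · have hp : List.isPrefixOf "}".toList (c :: t) = false := by
          rw [Bool.eq_false_iff]
          intro hpc
          obtain ⟨r, hr⟩ := List.isPrefixOf_iff_prefix.mp hpc
          simp at hr
          exact hc hr.1.symm
        simp only [hp, Bool.false_eq_true, if_false]
        rw [ih _ _ _ (by simp at h ⊢; omega)]
        rcases hsp : pvSp t with _ | ⟨s, ss⟩
        · exact absurd hsp (pvSp_ne_nil t)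
        · simp [pvSp, hsp, hc]


theorem sp_head_prefix (cs : List Char) : ∀ s ss, pvSp cs = s :: ss → s <+: cs := by
  induction cs with
  | nil => intro s ss h; simp [pvSp] at h; simp [h.1.symm]
  | cons c r ih =>
    intro s ss h
    by_cases hc : c = '}'
    · subst hc; simp [pvSp] at h; simp_all
    · rcases hsp : pvSp r with _ | ⟨s', ss'⟩
      · exact absurd hsp (pvSp_ne_nil r)
      · simp [pvSp, hc, hsp] at h
        exact h.1.symm ▸ List.cons_prefix_cons.mpr ⟨rfl, ih s' ss' hsp⟩

theorem sp_mem_infix (cs : List Char) : ∀ s ∈ pvSp cs, s <:+: cs := by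
  induction cs with
  | nil => simp [pvSp]
  | cons c r ih =>
    intro s hs
    by_cases hc : c = '}'
    · subst hc; simp [pvSp] at hs
      rcases hs with h | h
      · simp [h]
      · exact (ih s h).trans (List.infix_cons_iff.mpr (Or.inr (List.infix_refl r)))
    · rcases hsp : pvSp r with _ | ⟨s', ss'⟩
      · exact absurd hsp (pvSp_ne_nil r)
      · simp [pvSp, hc, hsp] at hs
        rcases hs with h | h
        · subst h
          exact (List.cons_prefix_cons.mpr ⟨rfl, sp_head_prefix r s' ss' hsp⟩).isInfix
        · have hm : s ∈ pvSp r := by rw [hsp]; exact List.mem_cons_of_mem _ h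
          exact (ih s hm).trans ⟨[c], [], by simp⟩

theorem cnt_pos_infix (s : List Char) (h : 1 ≤ pvCnt s) : ['%', '{'] <:+: s := by
  fun_induction pvCnt s with
  | case1 => simp at h
  | case2 => simp at h
  | case3 a b r hab ih =>
    obtain ⟨ha, hb⟩ := hab; subst ha hb
    exact ⟨[], r, rfl⟩
  | case4 a b r hab ih =>
    exact (ih h).trans ⟨[a], [], by simp⟩

theorem loop_spec (cs : List Char) (d : Nat) (hd : d ≤ 1) :
    pvLoopA cs d = (match pvSp cs with
      | s :: ss => decide (2 - d ≤ pvCnt s) || ss.any (fun t => decide (2 ≤ pvCnt t))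
      | [] => false) := by
  fun_induction pvLoopA cs d
  case case1 =>
    simp [pvSp, pvCnt]; omega
  case case2 rest depth hpos =>
    have hd1 : depth = 1 := by omega
    subst hd1
    rcases hsp : pvSp rest with _ | ⟨s, ss⟩
    · exact absurd hsp (pvSp_ne_nil rest)
    · simp [pvSp, hsp, pvCnt]
  case case3 rest depth hpos ih =>
    have hd0 : depth = 0 := by omega
    subst hd0
    rcases hsp : pvSp rest with _ | ⟨s, ss⟩
    · exact absurd hsp (pvSp_ne_nil rest)
    · have hsp2 : pvSp ('%' :: '{' :: rest) = ('%' :: '{' :: s) :: ss := by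
        simp [pvSp, hsp]
      have hcnt : pvCnt ('%' :: '{' :: s) = pvCnt s + 1 := by simp [pvCnt]
      rw [ih (by omega)]
      simp only [hsp, hsp2, hcnt]
      congr 1
      exact decide_eq_decide.mpr (by omega)
  case case4 c rest depth hx hcd ih =>
    obtain ⟨hc, hdep⟩ := hcd
    subst hc
    have hd1 : depth = 1 := by omega
    subst hd1
    rw [ih (by omega)]
    rcases hsp : pvSp rest with _ | ⟨s, ss⟩
    · exact absurd hsp (pvSp_ne_nil rest)
    · simp [pvSp, hsp, pvCnt]
  case case5 c rest depth hx hcd ih =>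
    rw [ih hd]
    by_cases hc : c = '}'
    · subst hc
      have hd0 : depth = 0 := by
        by_contra hne
        exact hcd ⟨rfl, hne⟩
      subst hd0
      rcases hsp : pvSp rest with _ | ⟨s, ss⟩
      · exact absurd hsp (pvSp_ne_nil rest)
      · simp [pvSp, hsp, pvCnt]
    · rcases hsp : pvSp rest with _ | ⟨s, ss⟩
      · exact absurd hsp (pvSp_ne_nil rest)
      · have hcnt : pvCnt (c :: s) = pvCnt s := by
          rcases s with _ | ⟨b, s'⟩
          · simp [pvCnt]
          · have hnb : ¬(c = '%' ∧ b = '{') := by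
              rintro ⟨h1, h2⟩
              subst h1 h2
              obtain ⟨t, ht⟩ := sp_head_prefix rest _ _ hsp
              exact hx (s' ++ t) rfl ht.symm
            simp [pvCnt, hnb]
        simp [pvSp, hsp, hc, hcnt]
theorem splitOn_eq_pvSp (cs : List Char) : PySem.Chars.splitOn cs "}".toList = pvSp cs := by
  rw [PySem.Chars.splitOn, split_go_eq _ _ _ _ (by omega)]
  rcases hsp : pvSp cs with _ | ⟨s, ss⟩
  · exact absurd hsp (pvSp_ne_nil cs)
  · simp

theorem count_eq_pvCnt (seg : List Char) : PySem.Chars.count seg "%{".toList = pvCnt seg := by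
  rw [PySem.Chars.count, count_go_eq _ _ _ (le_refl _)]
  simp

theorem pv_final (expr : String) :
    has_nested_token_reference_py expr = has_nested_token_reference_py_alt expr := by
  have halt : has_nested_token_reference_py_alt expr
      = (pvSp expr.toList).any (fun seg => decide (2 ≤ pvCnt seg)) := by
    rw [has_nested_token_reference_py_alt, splitOn_eq_pvSp]
    congr 1
    funext seg
    rw [count_eq_pvCnt]
  rw [halt, has_nested_token_reference_py]
  by_cases hin : PySem.Str.isIn "%{" expr
  · rw [hin]
    simp only [Bool.not_true, Bool.false_eq_true, if_false]
    rw [loop_spec _ 0 (by omega)]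
    rcases hsp : pvSp expr.toList with _ | ⟨s, ss⟩
    · exact absurd hsp (pvSp_ne_nil _)
    · simp
  · rw [Bool.eq_false_iff.mpr hin]
    simp only [Bool.not_false, if_true]
    symm
    rw [List.any_eq_false]
    intro seg hseg
    simp only [decide_eq_true_eq]
    intro h2
    have hinf : ['%', '{'] <:+: expr.toList :=
      (cnt_pos_infix seg (by omega)).trans (sp_mem_infix _ seg hseg)
    exact hin ((PySem.Str.isIn_iff_infix "%{" expr).mpr hinf)

-- ===== VERDICT (by name: the statement is the Claim_ definition above) =====
theorem has_nested_token_reference_py_spec : Claim_equal_has_nested_token_reference_py := by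
  intro expr _
  exact pv_final expr
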